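-- pv_equiv track=rewrite | github.com/lafont051645clomany/envdiff | envdiff/merger.py | merge_envs
-- ===== SOURCE A (Python) =====
-- from typing import Dict, List, Optional, Set
--
-- EnvDict = Dict[str, str]
--
-- def merge_envs(
--     envs: List[EnvDict],
--     protected_keys: Optional[Set[str]] = None,
-- ) -> EnvDict:
--     """Merge a list of env dicts left-to-right.
--
--     Args:
--         envs: Ordered list of env dicts.  Later entries override earlier ones.
--         protected_keys: Keys whose first-seen value is preserved (no override).
--
--     Returns:
--         A single merged env dict.
--     """
--     if protected_keys is None:
--         protected_keys = set()
--
--     merged: EnvDict = {}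
--     for env in envs:
--         for key, value in env.items():
--             if key in protected_keys and key in merged:
--                 continue
--             merged[key] = value
--     return merged
-- ===== SOURCE B (Python) =====
-- def merge_envs(envs, protected_keys=None):
--     """Naive later-wins merge plus a protected-first-seen correction pass."""
--     if protected_keys is None:
--         protected_keys = set()
--     merged = {}
--     first_seen = {}
--     for env in envs:
--         merged.update(env)
--         for key, value in env.items():
--             if key in protected_keys and key not in first_seen:
--                 first_seen[key] = value
--     for key, value in first_seen.items():
--         merged[key] = value
--     return merged
-- ===== Notes on version B (the rewrite author's own statement) =====
-- stated objective: alternative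
-- what changed: Instead of guarding every assignment with the protected-and-present test, B does a naive later-wins merge via dict.update plus a first_seen table for protected keys, then restores the first-seen values in a final correction pass.
import Mathlib
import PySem

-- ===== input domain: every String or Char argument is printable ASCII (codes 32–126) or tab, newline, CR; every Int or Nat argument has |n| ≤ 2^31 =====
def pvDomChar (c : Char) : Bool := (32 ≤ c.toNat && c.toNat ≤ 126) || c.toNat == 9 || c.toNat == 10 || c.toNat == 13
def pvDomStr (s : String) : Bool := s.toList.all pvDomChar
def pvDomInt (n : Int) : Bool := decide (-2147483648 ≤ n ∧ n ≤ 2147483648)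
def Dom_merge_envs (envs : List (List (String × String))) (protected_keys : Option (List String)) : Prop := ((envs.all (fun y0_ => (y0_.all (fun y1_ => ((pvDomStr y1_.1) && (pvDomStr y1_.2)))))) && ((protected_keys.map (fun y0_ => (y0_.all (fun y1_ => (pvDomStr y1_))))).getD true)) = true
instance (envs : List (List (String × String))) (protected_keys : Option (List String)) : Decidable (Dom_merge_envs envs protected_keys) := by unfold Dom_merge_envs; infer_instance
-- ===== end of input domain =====

-- B replaces A's per-assignment protection guard by a naive later-wins merge plus a
-- first_seen table for protected keys and a final correction pass (alternative decomposition).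

-- ===== PORT A =====
-- for env in envs: for key, value in env.items():
--   if key in protected_keys and key in merged: continue
--   merged[key] = value
def merge_envs (envs : List (List (String × String))) (protected_keys : Option (List String)) : List (String × String) :=
  let pk := protected_keys.getD []          -- if protected_keys is None: protected_keys = set()
  let merged : PySem.Dict String String :=
    envs.foldl (fun m env =>
      env.foldl (fun m kv =>
        if pk.contains kv.1 && m.contains kv.1 then m else m.insert kv.1 kv.2) m)
      PySem.Dict.empty
  merged.items

-- ===== PORT B =====
-- per env: merged.update(env), then first_seen[k] = v for protected k not yet seen;
-- finally for key, value in first_seen.items(): merged[key] = value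
def merge_envs_alt (envs : List (List (String × String))) (protected_keys : Option (List String)) : List (String × String) :=
  let pk := protected_keys.getD []
  let st :=
    envs.foldl (fun st env =>
      let m := env.foldl (fun m kv => m.insert kv.1 kv.2) st.1
      let fs := env.foldl (fun fs kv =>
        if pk.contains kv.1 && !fs.contains kv.1 then fs.insert kv.1 kv.2 else fs) st.2
      (m, fs))
      ((PySem.Dict.empty : PySem.Dict String String), (PySem.Dict.empty : PySem.Dict String String))
  let fixed := st.2.items.foldl (fun m kv => m.insert kv.1 kv.2) st.1
  fixed.items

-- ===== PRECONDITION & SPEC =====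
def Spec_merge_envs (envs : List (List (String × String))) (protected_keys : Option (List String)) (out : List (String × String)) : Prop := out = merge_envs_alt envs protected_keys
instance (envs : List (List (String × String))) (protected_keys : Option (List String)) (out : List (String × String)) : Decidable (Spec_merge_envs envs protected_keys out) := by unfold Spec_merge_envs; infer_instance

-- ===== CLAIM (what is proved, stated in full; the proofs are below) =====
def Claim_equal_merge_envs : Prop := ∀ (envs : List (List (String × String))) (protected_keys : Option (List String)), Dom_merge_envs envs protected_keys → Spec_merge_envs envs protected_keys (merge_envs envs protected_keys)

-- ===== LEMMAS AND PROOFS =====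

-- proof-side names for the loop bodies
def pvIns (m : PySem.Dict String String) (kv : String × String) : PySem.Dict String String :=
  m.insert kv.1 kv.2

def pvStepA (pk : List String) (m : PySem.Dict String String) (kv : String × String) :
    PySem.Dict String String :=
  if pk.contains kv.1 && m.contains kv.1 then m else m.insert kv.1 kv.2

def pvStepF (pk : List String) (fs : PySem.Dict String String) (kv : String × String) :
    PySem.Dict String String :=
  if pk.contains kv.1 && !fs.contains kv.1 then fs.insert kv.1 kv.2 else fs

def pvApply (fs m : PySem.Dict String String) : PySem.Dict String String :=
  fs.items.foldl pvIns m

-- nested env fold = fold over the flattened pair list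
lemma pvFoldFlatten (g : PySem.Dict String String → String × String → PySem.Dict String String)
    (envs : List (List (String × String))) (init : PySem.Dict String String) :
    envs.foldl (fun m env => env.foldl g m) init = envs.flatten.foldl g init := by
  induction envs generalizing init with
  | nil => rfl
  | cons e t ih => simp [List.foldl_append, ih]

-- B's pair-state fold splits into two independent flattened folds
lemma pvPairFold (pk : List String) (envs : List (List (String × String)))
    (m0 fs0 : PySem.Dict String String) :
    envs.foldl (fun st env =>
      (env.foldl pvIns st.1, env.foldl (pvStepF pk) st.2)) (m0, fs0)
    = (envs.flatten.foldl pvIns m0, envs.flatten.foldl (pvStepF pk) fs0) := by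
  induction envs generalizing m0 fs0 with
  | nil => rfl
  | cons e t ih =>
      rw [List.foldl_cons, List.flatten_cons, List.foldl_append, List.foldl_append, ← ih]

-- contains of an insert fold
lemma pvContainsFold (l : List (String × String)) (m : PySem.Dict String String) (k : String) :
    (l.foldl pvIns m).contains k = (m.contains k || l.any (fun p => p.1 == k)) := by
  induction l generalizing m with
  | nil => simp
  | cons p t ih =>
      rw [List.foldl_cons, ih, List.any_cons]
      show ((PySem.Dict.insert m p.1 p.2).contains k || _) = _
      rw [PySem.Dict.contains_insert]
      have hbeq : (p.1 == k) = (k == p.1) := by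
        rcases eq_or_ne k p.1 with h | h
        · simp [h]
        · simp [h, Ne.symm h]
      rw [hbeq, Bool.or_assoc, Bool.or_left_comm]

lemma pvContainsOfMemItems (d : PySem.Dict String String) (p : String × String)
    (h : p ∈ d.items) : d.contains p.1 = true := by
  rw [PySem.Dict.contains_iff_mem_keys]
  exact PySem.Dict.mem_keys_of_mem_items d h

lemma pvMemItemsOfContains (d : PySem.Dict String String) (k : String)
    (h : d.contains k = true) : k ∈ d.items.map Prod.fst := by
  rw [PySem.Dict.contains_iff_mem_keys] at h
  simpa [PySem.Dict.keys] using h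

-- inserts at distinct keys commute when the second key is already present
lemma pvInsComm (d : PySem.Dict String String) (k k' : String) (v v' : String)
    (h : k' ≠ k) (hc : d.contains k' = true) :
    (d.insert k v).insert k' v' = (d.insert k' v').insert k v := by
  apply PySem.Dict.ext
  by_cases hk : d.contains k = true
  · rw [PySem.Dict.items_insert_of_contains _ _ (by simp [PySem.Dict.contains_insert, hc]),
        PySem.Dict.items_insert_of_contains _ _ hk,
        PySem.Dict.items_insert_of_contains _ _ (by simp [PySem.Dict.contains_insert, hk]),
        PySem.Dict.items_insert_of_contains _ _ hc]
    simp only [List.map_map]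
    apply List.map_congr_left
    intro p _
    by_cases h1 : p.1 = k <;> by_cases h2 : p.1 = k' <;>
      simp_all [Function.comp, Ne.symm h]
  · have hk' : (d.insert k' v').contains k = false := by
      simp [PySem.Dict.contains_insert, hk]
      exact fun hh => h hh.symm
    rw [PySem.Dict.items_insert_of_contains _ _ (by simp [PySem.Dict.contains_insert, hc]),
        PySem.Dict.items_insert_of_not_contains _ _ (by simpa using hk),
        PySem.Dict.items_insert_of_not_contains _ _ hk',
        PySem.Dict.items_insert_of_contains _ _ hc]
    rw [List.map_append]
    simp [Ne.symm h]

-- pushing an insert of a key foreign to l through an insert fold whose keys are present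
lemma pvApplyInsertFresh (l : List (String × String)) (m : PySem.Dict String String)
    (k v : String) (hl : ∀ p ∈ l, p.1 ≠ k ∧ m.contains p.1 = true) :
    l.foldl pvIns (m.insert k v) = (l.foldl pvIns m).insert k v := by
  induction l generalizing m with
  | nil => rfl
  | cons p t ih =>
      have hp := hl p (by simp)
      have hcomm : pvIns (m.insert k v) p = (pvIns m p).insert k v := by
        simpa [pvIns] using pvInsComm m k p.1 v p.2 hp.1 hp.2
      rw [List.foldl_cons, List.foldl_cons, hcomm, ih]
      intro q hq
      have hq' := hl q (by simp [hq])
      exact ⟨hq'.1, by simp [pvIns, PySem.Dict.contains_insert, hq'.2]⟩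

-- re-inserting a present key whose value l later overrides is invisible to the fold
lemma pvApplyOverride (l : List (String × String)) (m : PySem.Dict String String)
    (k v : String) (hmem : k ∈ l.map Prod.fst) (hc : m.contains k = true)
    (hl : ∀ p ∈ l, m.contains p.1 = true) :
    l.foldl pvIns (m.insert k v) = l.foldl pvIns m := by
  induction l generalizing m with
  | nil => simp at hmem
  | cons p t ih =>
      by_cases hpk : p.1 = k
      · have heq : pvIns (m.insert k v) p = pvIns m p := by
          simp [pvIns, hpk, PySem.Dict.insert_insert_self]
        rw [List.foldl_cons, List.foldl_cons, heq]
      · have hmem' : k ∈ t.map Prod.fst := by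
          rcases List.mem_map.mp hmem with ⟨q, hq, hq1⟩
          rcases List.mem_cons.mp hq with h | h
          · exact absurd (h ▸ hq1) hpk
          · exact List.mem_map.mpr ⟨q, h, hq1⟩
        have hp := hl p (by simp)
        have hcomm : pvIns (m.insert k v) p = (pvIns m p).insert k v := by
          simpa [pvIns] using pvInsComm m k p.1 v p.2 hpk hp
        rw [List.foldl_cons, List.foldl_cons, hcomm]
        apply ih _ hmem'
        · simp [pvIns, PySem.Dict.contains_insert, hc]
        · intro q hq
          simp [pvIns, PySem.Dict.contains_insert, hl q (by simp [hq])]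

lemma pvAnyItems (d : PySem.Dict String String) (k : String) :
    (d.items.any fun p => p.1 == k) = d.contains k := by
  by_cases h : d.contains k = true
  · rw [h, List.any_eq_true]
    rcases List.mem_map.mp (pvMemItemsOfContains d k h) with ⟨p, hp, hp1⟩
    exact ⟨p, hp, by simp [hp1]⟩
  · simp only [Bool.not_eq_true] at h
    rw [h, List.any_eq_false]
    intro p hp
    simp only [beq_iff_eq]
    intro he
    exact absurd (he ▸ pvContainsOfMemItems d p hp) (by simp [h])

-- the invariant-carrying induction over the flattened pair list
lemma pvMain (pk : List String) (P : List (String × String))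
    (a m fs : PySem.Dict String String)
    (h1 : a = pvApply fs m)
    (h2 : ∀ k, fs.contains k = true → pk.contains k = true)
    (h3 : ∀ k, pk.contains k = true → fs.contains k = m.contains k) :
    P.foldl (pvStepA pk) a = pvApply (P.foldl (pvStepF pk) fs) (P.foldl pvIns m) := by
  induction P generalizing a m fs with
  | nil => simpa using h1
  | cons kv t ih =>
      obtain ⟨k, v⟩ := kv
      have hfsKeys : ∀ p ∈ fs.items, m.contains p.1 = true := by
        intro p hp
        have hc := pvContainsOfMemItems fs p hp
        rw [← h3 p.1 (h2 p.1 hc)]; exact hc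
      have hfsNe : fs.contains k = false → ∀ p ∈ fs.items, p.1 ≠ k ∧ m.contains p.1 = true := by
        intro hfk p hp
        refine ⟨fun he => ?_, hfsKeys p hp⟩
        have hc := pvContainsOfMemItems fs p hp
        rw [he, hfk] at hc; exact absurd hc (by simp)
      have haC : a.contains k = (m.contains k || fs.contains k) := by
        rw [h1, pvApply, pvContainsFold, pvAnyItems]
      by_cases hp : pk.contains k = true
      · by_cases hm : m.contains k = true
        · -- protected and present: A skips; B overwrites merged but first_seen shadows it
          have hfk : fs.contains k = true := by rw [h3 k hp]; exact hm
          have hA : pvStepA pk a (k, v) = a := by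
            have hc : (pk.contains k && a.contains k) = true := by
              rw [haC, hp, hm]; rfl
            simp only [pvStepA]; rw [hc]; simp
          have hF : pvStepF pk fs (k, v) = fs := by
            have hc : (pk.contains k && !fs.contains k) = false := by
              rw [hp, hfk]; rfl
            simp only [pvStepF]; rw [hc]; simp
          rw [List.foldl_cons, List.foldl_cons, List.foldl_cons, hA, hF]
          apply ih
          · rw [h1, pvApply, pvApply]
            show fs.items.foldl pvIns m = fs.items.foldl pvIns (m.insert k v)
            exact (pvApplyOverride fs.items m k v (pvMemItemsOfContains fs k hfk) hm hfsKeys).symm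
          · exact h2
          · intro k' hk'
            show fs.contains k' = (PySem.Dict.insert m k v).contains k'
            rw [PySem.Dict.contains_insert, h3 k' hk']
            rcases eq_or_ne k' k with he | he
            · subst he; simp [hm]
            · simp [he]
        · -- protected and fresh: everyone inserts
          have hm' : m.contains k = false := by simpa using hm
          have hfk : fs.contains k = false := by rw [h3 k hp]; exact hm'
          have hA : pvStepA pk a (k, v) = a.insert k v := by
            have hc : (pk.contains k && a.contains k) = false := by
              rw [haC, hm', hfk]; simp
            simp only [pvStepA]; rw [hc]; simp
          have hF : pvStepF pk fs (k, v) = fs.insert k v := by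
            have hc : (pk.contains k && !fs.contains k) = true := by
              rw [hp, hfk]; rfl
            simp only [pvStepF]; rw [hc]; simp
          rw [List.foldl_cons, List.foldl_cons, List.foldl_cons, hA, hF]
          apply ih
          · show a.insert k v = pvApply (fs.insert k v) (PySem.Dict.insert m k v)
            rw [h1, pvApply, pvApply,
                PySem.Dict.items_insert_of_not_contains _ _ hfk, List.foldl_append,
                pvApplyInsertFresh fs.items m k v (hfsNe hfk)]
            show _ = pvIns ((pvApply fs m).insert k v) (k, v)
            rw [show pvIns ((pvApply fs m).insert k v) (k, v)
                  = ((pvApply fs m).insert k v).insert k v from rfl,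
                PySem.Dict.insert_insert_self]
            rfl
          · intro k' hk'
            rw [PySem.Dict.contains_insert] at hk'
            rcases Bool.or_eq_true_iff.mp hk' with he | he
            · rw [show k' = k from by simpa using he]; exact hp
            · exact h2 k' he
          · intro k' hk'
            show (fs.insert k v).contains k' = (PySem.Dict.insert m k v).contains k'
            rw [PySem.Dict.contains_insert, PySem.Dict.contains_insert, h3 k' hk']
      · -- unprotected: both just insert into merged, first_seen untouched
        have hp' : pk.contains k = false := by simpa using hp
        have hfk : fs.contains k = false := by
          by_contra hc
          simp only [Bool.not_eq_false] at hc
          exact hp (h2 k hc)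
        have hA : pvStepA pk a (k, v) = a.insert k v := by
          have hc : (pk.contains k && a.contains k) = false := by rw [hp']; rfl
          simp only [pvStepA]; rw [hc]; simp
        have hF : pvStepF pk fs (k, v) = fs := by
          have hc : (pk.contains k && !fs.contains k) = false := by rw [hp']; rfl
          simp only [pvStepF]; rw [hc]; simp
        rw [List.foldl_cons, List.foldl_cons, List.foldl_cons, hA, hF]
        apply ih
        · show a.insert k v = pvApply fs (PySem.Dict.insert m k v)
          rw [h1, pvApply, pvApply, pvApplyInsertFresh fs.items m k v (hfsNe hfk)]
        · exact h2
        · intro k' hk'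
          have hne : k' ≠ k := fun he => absurd (he ▸ hk') hp
          show fs.contains k' = (PySem.Dict.insert m k v).contains k'
          rw [PySem.Dict.contains_insert, h3 k' hk']
          simp [hne]

-- ===== VERDICT (by name: the statement is the Claim_ definition above) =====
theorem merge_envs_spec : Claim_equal_merge_envs := by
  intro envs pks _
  unfold Spec_merge_envs merge_envs merge_envs_alt
  simp only []
  rw [pvFoldFlatten]
  show _ = (List.foldl pvIns
      ((envs.foldl (fun st env => (env.foldl pvIns st.1, env.foldl (pvStepF (pks.getD [])) st.2))
        ((PySem.Dict.empty : PySem.Dict String String), (PySem.Dict.empty : PySem.Dict String String))).1)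
      ((envs.foldl (fun st env => (env.foldl pvIns st.1, env.foldl (pvStepF (pks.getD [])) st.2))
        ((PySem.Dict.empty : PySem.Dict String String), (PySem.Dict.empty : PySem.Dict String String))).2.items)).items
  rw [pvPairFold]
  show (envs.flatten.foldl (pvStepA (pks.getD [])) PySem.Dict.empty).items
      = (pvApply (envs.flatten.foldl (pvStepF (pks.getD [])) PySem.Dict.empty)
          (envs.flatten.foldl pvIns PySem.Dict.empty)).items
  rw [pvMain (pks.getD []) envs.flatten PySem.Dict.empty PySem.Dict.empty PySem.Dict.empty
      rfl (by simp) (by simp)]
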